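-- pv_equiv track=rewrite | github.com/TUW-GEO/pytesmo | src/pytesmo/validation_framework/data_manager.py | get_result_names
-- ===== SOURCE A (Python) =====
-- import itertools
--
-- def flatten(seq):
--     eltl = []
--     for elt in seq:
--         t = type(elt)
--         if t is tuple or t is list:
--             for elt2 in flatten(elt):
--                 eltl.append(elt2)
--         else:
--             eltl.append(elt)
--     return eltl
--
-- def get_result_names(ds_dict, refkey, n=2):
--     """
--     Return result names based on all possible combinations based on a
--     reference dataset.
--
--     Parameters
--     ----------
--     ds_dict: dict
--        Dict of lists containing the dataset names as keys and a list of the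
--        columns to read from the dataset as values.
--     refkey: string
--        dataset name to use as a reference
--     n: int
--         Number of datasets for combine with each other.
--         If n=2 always two datasets will be combined into one result.
--         If n=3 always three datasets will be combined into one results and
--         so on.
--         n has to be <= the number of total datasets.
--
--     Returns
--     -------
--     results_names : list of tuples
--         Containing all combinations of
--         (referenceDataset.column, otherDataset.column)
--     """
--     results_names = []
--
--     ref_columns = []
--     for column in ds_dict[refkey]:
--         ref_columns.append((refkey, column))
--
--     other_columns = []
--     other_names = list(ds_dict)
--     del other_names[other_names.index(refkey)]
--     for other in sorted(other_names):
--         for column in ds_dict[other]: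
--             other_columns.append((other, column))
--
--     for comb in itertools.product(
--         ref_columns, itertools.combinations(other_columns, n - 1)
--     ):
--         results_names.append(comb)
--
--     # flatten to one level and remove those that do not have n unique
--     # datasets
--     results_names = flatten(results_names)
--
--     # iterate in chunks of n*2 over the list
--     result_combos = []
--     for chunk in [
--         results_names[pos: pos + n * 2]
--         for pos in range(0, len(results_names), n * 2)
--     ]:
--         combo = []
--         datasets = chunk[::2]
--         columns = chunk[1::2]
--         # if datasets are compared to themselves then don't include the
--         # combination
--         if len(set(datasets)) != n:
--             continue
--         for dataset, column in zip(datasets, columns):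
--             combo.append((dataset, column))
--         result_combos.append(tuple(sorted(combo)))
--
--     return result_combos
-- ===== SOURCE B (Python) =====
-- import itertools
--
--
-- def get_result_names(ds_dict, refkey, n=2):
--     ref_columns = [(refkey, column) for column in ds_dict[refkey]]
--     other_columns = [
--         (other, column)
--         for other in sorted(k for k in ds_dict if k != refkey)
--         for column in ds_dict[other]
--     ]
--     result_combos = []
--     for ref_col in ref_columns:
--         for comb in itertools.combinations(other_columns, n - 1):
--             combo = (ref_col,) + comb
--             if len({dataset for dataset, _ in combo}) == n:
--                 result_combos.append(tuple(sorted(combo)))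
--     return result_combos
-- ===== Notes on version B (the rewrite author's own statement) =====
-- stated objective: simpler
-- what changed: B drops A's flatten-to-strings / re-chunk-by-slices machinery entirely and builds each result tuple directly: for every reference column and every (n-1)-combination of other columns it conses them into one combo, filters on the number of distinct dataset names, and sorts, in the same iteration order.
import Mathlib
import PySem

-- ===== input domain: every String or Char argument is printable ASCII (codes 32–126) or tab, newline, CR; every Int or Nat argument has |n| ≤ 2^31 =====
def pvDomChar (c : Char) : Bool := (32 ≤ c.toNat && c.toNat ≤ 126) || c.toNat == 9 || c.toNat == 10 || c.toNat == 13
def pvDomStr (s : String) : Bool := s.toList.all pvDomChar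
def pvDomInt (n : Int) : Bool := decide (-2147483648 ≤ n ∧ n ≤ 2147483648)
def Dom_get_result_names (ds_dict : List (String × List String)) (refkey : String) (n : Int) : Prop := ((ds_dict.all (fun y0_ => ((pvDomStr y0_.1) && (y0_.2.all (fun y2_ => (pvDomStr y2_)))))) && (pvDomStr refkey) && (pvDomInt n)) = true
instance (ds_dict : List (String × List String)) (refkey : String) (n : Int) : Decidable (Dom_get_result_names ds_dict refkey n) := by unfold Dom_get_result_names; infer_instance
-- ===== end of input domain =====

-- B drops A's flatten/re-chunk machinery and builds each combination tuple directly
-- (ref column consed onto each (n-1)-combination, filtered and sorted in place): simpler, same values.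

-- itertools.combinations(xs, r) in itertools' emission order (shared library helper, used by both ports)
def pyCombos {α : Type} : Nat → List α → List (List α)
  | 0, _ => [[]]
  | _ + 1, [] => []
  | r + 1, x :: xs => (pyCombos r xs).map (x :: ·) ++ pyCombos (r + 1) xs

-- ===== PORT A =====
-- Python's recursive `flatten`, specialised at the one element type it is applied to here
-- (a pair of a (str,str) tuple and a tuple of (str,str) tuples): exact, since every leaf is a string.
def pvFlatten (seq : List ((String × String) × List (String × String))) : List String :=
  seq.flatMap (fun elt => elt.1.1 :: elt.1.2 :: elt.2.flatMap (fun q => [q.1, q.2]))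

def get_result_names (ds_dict : List (String × List String)) (refkey : String) (n : Int) : List (List (String × String)) :=
  let d := PySem.Dict.ofList ds_dict
  -- ds_dict[refkey] (Pre_ excludes the KeyError)
  let ref_columns := ((d.get? refkey).getD []).map (fun column => (refkey, column))
  -- del other_names[other_names.index(refkey)] = remove the first occurrence (Pre_ excludes the ValueError)
  let other_names := (PySem.List.remove? d.keys refkey).getD d.keys
  let other_columns := (PySem.List.sorted other_names (fun k => k)).flatMap
      (fun other => ((d.get? other).getD []).map (fun column => (other, column)))
  -- itertools.product(ref_columns, itertools.combinations(other_columns, n - 1))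
  let results_names : List ((String × String) × List (String × String)) :=
    ref_columns.flatMap (fun rc => (pyCombos (n - 1).toNat other_columns).map (fun cb => (rc, cb)))
  let flat := pvFlatten results_names
  -- [results_names[pos: pos + n*2] for pos in range(0, len(results_names), n*2)]
  let chunks := (PySem.List.pyRange 0 flat.length (n * 2)).map
      (fun pos => PySem.List.slice flat (some pos) (some (pos + n * 2)))
  chunks.foldl (fun acc chunk =>
    let datasets := (PySem.List.slice? chunk none none 2).getD []
    let columns := (PySem.List.slice? chunk (some 1) none 2).getD []
    if ((PySem.Set.ofList datasets).length : Int) ≠ n then acc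
    else acc ++ [PySem.List.sorted2 (datasets.zip columns) (fun p => p.1) (fun p => p.2)]) []

-- ===== PORT B =====
def get_result_names_alt (ds_dict : List (String × List String)) (refkey : String) (n : Int) : List (List (String × String)) :=
  let d := PySem.Dict.ofList ds_dict
  let ref_columns := ((d.get? refkey).getD []).map (fun column => (refkey, column))
  let other_columns := (PySem.List.sorted (d.keys.filter (fun k => !(k == refkey))) (fun k => k)).flatMap
      (fun other => ((d.get? other).getD []).map (fun column => (other, column)))
  ref_columns.flatMap (fun ref_col =>
    (pyCombos (n - 1).toNat other_columns).filterMap (fun comb =>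
      let combo := ref_col :: comb
      if ((PySem.Set.ofList (combo.map (fun p => p.1))).length : Int) = n
      then some (PySem.List.sorted2 combo (fun p => p.1) (fun p => p.2))
      else none))

-- ===== PRECONDITION & SPEC =====
-- Pre_ excludes exactly where A raises: KeyError when refkey is not a key of ds_dict,
-- and ValueError from itertools.combinations(…, n-1) when n < 1.
def Pre_get_result_names (ds_dict : List (String × List String)) (refkey : String) (n : Int) : Prop :=
  refkey ∈ (PySem.Dict.ofList ds_dict).keys ∧ 1 ≤ n
instance (ds_dict : List (String × List String)) (refkey : String) (n : Int) : Decidable (Pre_get_result_names ds_dict refkey n) := by unfold Pre_get_result_names; infer_instance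
def pvWitness_get_result_names : (List (String × List String)) × String × Int :=
  ([("r", ["c1", "c2"]), ("a", ["x"]), ("b", ["y"])], "r", 2)

def Spec_get_result_names (ds_dict : List (String × List String)) (refkey : String) (n : Int) (out : List (List (String × String))) : Prop := out = get_result_names_alt ds_dict refkey n
instance (ds_dict : List (String × List String)) (refkey : String) (n : Int) (out : List (List (String × String))) : Decidable (Spec_get_result_names ds_dict refkey n out) := by unfold Spec_get_result_names; infer_instance

-- ===== CLAIM (what is proved, stated in full; the proofs are below) =====
def Claim_equal_get_result_names : Prop := ∀ (ds_dict : List (String × List String)) (refkey : String) (n : Int), Dom_get_result_names ds_dict refkey n → Pre_get_result_names ds_dict refkey n → Spec_get_result_names ds_dict refkey n (get_result_names ds_dict refkey n)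

-- ===== LEMMAS AND PROOFS =====

-- the interleaved string list a chunk is made of
def pvInter (l : List (String × String)) : List String := l.flatMap (fun q => [q.1, q.2])

-- removing the first occurrence from a duplicate-free list is filtering it out
theorem pv_remove_eq_filter (l : List String) (k : String) (h : l.Nodup) :
    (PySem.List.remove? l k).getD l = l.filter (fun x => !(x == k)) := by
  have herase : l.filter (fun x => !(x == k)) = l.erase k := by
    rw [List.Nodup.erase_eq_filter h k]
    simp [bne]
  rw [herase, List.erase_eq_eraseIdx]
  cases h' : List.idxOf? k l with
  | none =>
    have : k ∉ l := List.idxOf?_eq_none_iff.1 h'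
    simp [PySem.List.remove?, h']
  | some i => simp [PySem.List.remove?, h']

-- every combination emitted by pyCombos r has length r
theorem pv_length_pyCombos {α : Type} (r : Nat) (xs : List α) :
    ∀ cb ∈ pyCombos r xs, cb.length = r := by
  induction xs generalizing r with
  | nil => cases r with
    | zero => intro cb hcb; simp [pyCombos] at hcb; simp [hcb]
    | succ r => intro cb hcb; simp [pyCombos] at hcb
  | cons x t ih => cases r with
    | zero => intro cb hcb; simp [pyCombos] at hcb; simp [hcb]
    | succ r =>
      intro cb hcb
      simp only [pyCombos, List.mem_append, List.mem_map] at hcb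
      rcases hcb with ⟨cb', hcb', rfl⟩ | hcb
      · simp [ih r cb' hcb']
      · exact ih (r+1) cb hcb

theorem pv_inter_get_even (l : List (String × String)) (k : Nat) :
    (pvInter l)[2*k]? = (l[k]?).map (fun p => p.1) := by
  induction l generalizing k with
  | nil => simp [pvInter]
  | cons a t ih =>
    cases k with
    | zero => simp [pvInter]
    | succ k =>
      have h2 : 2 * (k+1) = (2*k) + 1 + 1 := by omega
      simp only [pvInter, List.flatMap_cons] at ih ⊢
      simp [h2, ih k]

theorem pv_inter_get_odd (l : List (String × String)) (k : Nat) :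
    (pvInter l)[2*k+1]? = (l[k]?).map (fun p => p.2) := by
  induction l generalizing k with
  | nil => simp [pvInter]
  | cons a t ih =>
    cases k with
    | zero => simp [pvInter]
    | succ k =>
      have h2 : 2 * (k+1) + 1 = (2*k+1) + 1 + 1 := by omega
      simp only [pvInter, List.flatMap_cons] at ih ⊢
      simp [h2, ih k]

theorem pv_inter_len (l : List (String × String)) :
    (pvInter l).length = 2 * l.length := by
  induction l with
  | nil => simp [pvInter]
  | cons a t ih =>
    simp only [pvInter, List.flatMap_cons] at ih ⊢
    simp [ih]; omega

theorem pv_filterMap_getElem_range {α : Type} (m : List α) :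
    List.filterMap (fun x => m[x]?) (List.range m.length) = m := by
  induction m using List.reverseRecOn with
  | nil => simp
  | append_singleton m a ih =>
    rw [List.length_append, List.length_singleton, List.range_succ, List.filterMap_append]
    rw [List.filterMap_congr (g := fun x => m[x]?) ?h]
    · simp [ih]
    case h =>
      intro x hx
      exact List.getElem?_append_left (List.mem_range.1 hx)

-- the even-index slice of an interleaved pair list recovers the first components
theorem pv_evens_interleave (l : List (String × String)) :
    (PySem.List.slice? (pvInter l) none none 2).getD [] = l.map (fun p => p.1) := by
  have hlen : (pvInter l).length = 2 * l.length := pv_inter_len l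
  simp only [PySem.List.slice?, PySem.List.sliceIndices, hlen]
  norm_num
  have hcount : (if 0 < l.length then ((2 * (l.length:Int) + 2 - 1) / 2).toNat else 0) = l.length := by
    split <;> omega
  rw [hcount]
  rw [List.filterMap_congr (g := fun x => (l.map (fun p => p.1))[x]?) ?h]
  · have := pv_filterMap_getElem_range (l.map (fun p => p.1))
    simpa using this
  case h =>
    intro x hx
    rw [show ((2:Int) * (x:Int)).toNat = 2*x by omega, pv_inter_get_even l x]
    simp

-- the odd-index slice of an interleaved pair list recovers the second components
theorem pv_odds_interleave (l : List (String × String)) :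
    (PySem.List.slice? (pvInter l) (some 1) none 2).getD [] = l.map (fun p => p.2) := by
  cases hl : l with
  | nil => simp [pvInter, PySem.List.slice?, PySem.List.sliceIndices]
  | cons a t =>
    rw [← hl]
    have hL : 0 < l.length := by rw [hl]; simp
    have hlen : (pvInter l).length = 2 * l.length := pv_inter_len l
    simp only [PySem.List.slice?, PySem.List.sliceIndices, hlen]
    norm_num
    have hmin : min 1 (2 * (l.length : Int)) = 1 := by omega
    rw [hmin]
    have hcount : (if 1 < 2 * (l.length:Int) then ((2 * (l.length:Int) - 1 + 2 - 1) / 2).toNat else 0) = l.length := by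
      split <;> omega
    rw [hcount]
    rw [List.filterMap_congr (g := fun x => (l.map (fun p => p.2))[x]?) ?h]
    · have := pv_filterMap_getElem_range (l.map (fun p => p.2))
      simpa using this
    case h =>
      intro x hx
      rw [show ((1:Int) + 2 * (x:Int)).toNat = 2*x+1 by omega, pv_inter_get_odd l x]
      simp

theorem pv_drop_flatten (L : Nat) (bs : List (List String)) (hlen : ∀ b ∈ bs, b.length = L)
    (i : Nat) : bs.flatten.drop (L * i) = (bs.drop i).flatten := by
  induction i generalizing bs with
  | zero => simp
  | succ i ih =>
    cases bs with
    | nil => simp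
    | cons b t =>
      have hb : b.length = L := hlen b (by simp)
      rw [List.flatten_cons, show L * (i+1) = b.length + L * i from by rw [hb, Nat.mul_succ, Nat.add_comm],
        List.drop_length_add_append, List.drop_succ_cons]
      exact ih t (fun x hx => hlen x (by simp [hx]))

theorem pv_flatten_len (L : Nat) : ∀ (bs : List (List String)), (∀ b ∈ bs, b.length = L) → bs.flatten.length = bs.length * L
  | [], _ => by simp
  | b :: t, h => by
    simp only [List.flatten_cons, List.length_append, List.length_cons, h b (by simp),
      pv_flatten_len L t (fun x hx => h x (by simp [hx]))]
    ring

-- chunking the concatenation of uniform-length blocks gives back the blocks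
theorem pv_chunks_flatten (bs : List (List String)) (L : Nat) (hL : 0 < L)
    (hlen : ∀ b ∈ bs, b.length = L) :
    (PySem.List.pyRange 0 bs.flatten.length (L : Int)).map
      (fun pos => PySem.List.slice bs.flatten (some pos) (some (pos + (L : Int)))) = bs := by
  have hLZ : (0:Int) < (L:Int) := by exact_mod_cast hL
  have hflat : bs.flatten.length = bs.length * L := pv_flatten_len L bs hlen
  rw [PySem.List.pyRange_of_pos 0 (bs.flatten.length) hLZ]
  have hcount : (if (0:Int) < bs.flatten.length then (((bs.flatten.length:Int) - 0 + L - 1) / L).toNat else 0) = bs.length := by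
    by_cases hB : bs.length = 0
    · have h0 : bs.flatten.length = 0 := by rw [hflat, hB, Nat.zero_mul]
      simp [h0, hB]
    · have hpos : (0:Int) < bs.flatten.length := by
        have : 0 < bs.flatten.length := by
          rw [hflat]; exact Nat.mul_pos (Nat.pos_of_ne_zero hB) hL
        exact_mod_cast this
      rw [if_pos hpos]
      have heq : ((bs.flatten.length:Int) - 0 + L - 1) = (L - 1) + L * bs.length := by
        rw [hflat]; push_cast; ring
      rw [heq, Int.add_mul_ediv_left _ _ (by omega : (L:Int) ≠ 0),
        Int.ediv_eq_zero_of_lt (by omega) (by omega)]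
      omega
  rw [hcount]
  apply List.ext_getElem
  · simp
  · intro i h1 h2
    simp only [List.getElem_map, List.getElem_range]
    have hcast : (0:Int) + (L:Int) * (i:Int) = ((L * i : Nat) : Int) := by push_cast; ring
    rw [hcast, show ((L * i : Nat) : Int) + (L:Int) = ((L * i + L : Nat) : Int) from by push_cast; ring,
      PySem.List.slice_natCast]
    rw [pv_drop_flatten L bs hlen i]
    have hi : i < bs.length := by simpa using h2
    rw [List.drop_eq_getElem_cons hi, List.flatten_cons]
    rw [show L * i + L - L * i = L from by omega, ← hlen bs[i] (by simp), List.take_left]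

theorem pv_filterMap_ite {α β : Type} (v : α → Int) (nn : Int) (f : α → β) (l : List α) :
    l.filterMap (fun x => if v x = nn then some (f x) else none)
      = (l.filter (fun x => v x == nn)).map f := by
  induction l with
  | nil => rfl
  | cons a t ih => by_cases h : v a = nn <;> simp [h, ih]

theorem pv_pvFlatten_eq (seq : List ((String × String) × List (String × String))) :
    pvFlatten seq = (seq.map (fun p => pvInter (p.1 :: p.2))).flatten := by
  simp [pvFlatten, pvInter, List.flatMap_def]

theorem pv_foldl_if_ne {α β : Type} (v : α → Int) (nn : Int) (g : α → β) (l : List α) (init : List β) :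
    l.foldl (fun acc x => if v x ≠ nn then acc else acc ++ [g x]) init
      = init ++ (l.filter (fun x => v x == nn)).map g := by
  induction l generalizing init with
  | nil => simp
  | cons a t ih =>
    simp only [List.foldl_cons]
    by_cases h : v a = nn
    · rw [if_neg (by simp [h]), ih, List.filter_cons_of_pos (by simp [h])]
      simp
    · rw [if_pos (by simp [h]), ih, List.filter_cons_of_neg (by simp [h])]

theorem pv_map_filter_flatMap {α β γ : Type} (l : List α) (f : α → List β) (q : β → Bool) (h : β → γ) :
    ((l.flatMap f).filter q).map h = l.flatMap (fun a => (((f a).filter q).map h)) := by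
  induction l with
  | nil => simp
  | cons a t ih => simp [List.filter_append, ih]

-- ===== VERDICT (by name: the statement is the Claim_ definition above) =====
theorem get_result_names_spec : Claim_equal_get_result_names := by
  intro ds_dict refkey n hdom hpre
  obtain ⟨hkey, hn⟩ := hpre
  unfold Spec_get_result_names get_result_names get_result_names_alt
  simp only []
  rw [pv_remove_eq_filter _ refkey (PySem.Dict.nodup_keys_ofList ds_dict)]
  set d := PySem.Dict.ofList ds_dict with hd
  set oc := (List.flatMap
      (fun other => List.map (fun column => (other, column)) ((d.get? other).getD []))
      (PySem.List.sorted (List.filter (fun x => !x == refkey) d.keys) fun k => k)) with hoc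
  set refCols := List.map (fun column => (refkey, column)) ((d.get? refkey).getD []) with hrefCols
  set combs := pyCombos (n - 1).toNat oc with hcombs
  set results := List.flatMap (fun rc => List.map (fun cb => (rc, cb)) combs) refCols with hresults
  set r := (n - 1).toNat with hr
  rw [pv_pvFlatten_eq results]
  set bs := results.map (fun p => pvInter (p.1 :: p.2)) with hbs
  have hlen_bs : ∀ b ∈ bs, b.length = 2 * (r + 1) := by
    intro b hb
    rw [hbs] at hb
    obtain ⟨p, hp, rfl⟩ := List.mem_map.1 hb
    rw [hresults] at hp
    obtain ⟨rc, _, hp2⟩ := List.mem_flatMap.1 hp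
    obtain ⟨cb, hcb, rfl⟩ := List.mem_map.1 hp2
    rw [pv_inter_len, List.length_cons, pv_length_pyCombos r oc cb hcb]
  have hn2 : n * 2 = ((2 * (r + 1) : Nat) : Int) := by
    rw [hr]; push_cast; omega
  rw [hn2, pv_chunks_flatten bs (2 * (r + 1)) (by omega) hlen_bs]
  rw [pv_foldl_if_ne, List.nil_append, List.filter_map, List.map_map, hresults,
    pv_map_filter_flatMap]
  congr 1
  funext rc
  rw [List.filter_map, List.map_map, pv_filterMap_ite]
  congr 1
  · funext cb
    simp only [Function.comp_apply]
    rw [pv_evens_interleave (rc :: cb), pv_odds_interleave (rc :: cb), List.zip_map']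
    simp
  · apply List.filter_congr
    intro cb _
    simp only [Function.comp_apply]
    rw [pv_evens_interleave (rc :: cb)]
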